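-- pv_equiv track=rewrite | github.com/GaryDoooo/emoji_game | team.py | cal_att
-- ===== SOURCE A (Python) =====
-- def cal_att(team):
--     if len(team) == 0:
--         return [0] * 5
--     attribute_table = [[0] * 5] * 6
--     # player attrs: HP 0, attack 1, defense 2, speed 3, luck 4
--     #^_^ att
--     attribute_table[0] = [4, 2, 2, 4, 2]
--     # T-T att
--     attribute_table[1] = [5, 2, 4, 2, 1]
--     #@_@ att
--     attribute_table[2] = [3, 5, 3, 1, 2]
--     #@.@ att
--     attribute_table[3] = [4, 3, 3, 3, 1]
--     #*-* att
--     attribute_table[4] = [5, 4, 2, 1, 2]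
--     #:p att
--     attribute_table[5] = [1, 2, 1, 5, 5]
--     att = [1] * 5
--     for i in team:
--         i = i - 1
--         att = [a * b for a, b in zip(att, attribute_table[i])]
--     return att
-- ===== SOURCE B (Python) =====
-- def cal_att(team):
--     if len(team) == 0:
--         return [0] * 5
--     # one column per attribute (HP, attack, defense, speed, luck), one entry per player type
--     columns = [[4, 5, 3, 4, 5, 1],
--                [2, 2, 5, 3, 4, 2],
--                [2, 4, 3, 3, 2, 1],
--                [4, 2, 1, 3, 1, 5],
--                [2, 1, 2, 1, 2, 5]]
--     counts = {}
--     for t in team: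
--         counts[t] = counts.get(t, 0) + 1
--     att = []
--     for col in columns:
--         p = 1
--         for t, c in counts.items():
--             p *= col[t - 1] ** c
--         att.append(p)
--     return att
-- ===== Notes on version B (the rewrite author's own statement) =====
-- stated objective: alternative
-- what changed: B tallies the team into a dict of per-value multiplicities and computes each attribute column-wise as a product of table entries raised to those counts, instead of A's per-member row-wise componentwise multiplication; Pre_ excludes teams with a member outside -5..6, on which A's attribute_table[i-1] raises IndexError.
import Mathlib
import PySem

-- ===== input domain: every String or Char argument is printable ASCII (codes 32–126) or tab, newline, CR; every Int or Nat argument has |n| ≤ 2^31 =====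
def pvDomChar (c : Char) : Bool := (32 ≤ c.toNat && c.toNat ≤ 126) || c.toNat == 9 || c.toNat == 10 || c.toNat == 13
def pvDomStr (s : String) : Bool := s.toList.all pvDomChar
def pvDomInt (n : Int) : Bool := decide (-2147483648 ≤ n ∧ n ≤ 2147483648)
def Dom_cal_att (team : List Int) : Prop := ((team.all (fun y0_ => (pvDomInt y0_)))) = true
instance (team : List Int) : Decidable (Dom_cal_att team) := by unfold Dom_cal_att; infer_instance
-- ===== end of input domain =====

-- B tallies the team in a dict keyed by player value and computes each attribute as a column product of table entries raised to those counts, instead of A's per-member row-wise multiplication.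


-- ===== PORT A =====
-- A's attribute_table after its six row assignments
def calTableA : List (List Int) :=
  [[4, 2, 2, 4, 2], [5, 2, 4, 2, 1], [3, 5, 3, 1, 2],
   [4, 3, 3, 3, 1], [5, 4, 2, 1, 2], [1, 2, 1, 5, 5]]

def cal_att (team : List Int) : List Int :=
  if team.length = 0 then List.replicate 5 0
  else
    team.foldl
      (fun att i =>
        -- att = [a * b for a, b in zip(att, attribute_table[i - 1])]; Pre_ excludes the IndexError
        List.zipWith (· * ·) att ((PySem.List.pyGet? calTableA (i - 1)).getD []))
      (List.replicate 5 1)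

-- ===== PORT B =====
-- B's table, stored one column per attribute (entry per player type)
def colsB : List (List Int) :=
  [[4, 5, 3, 4, 5, 1], [2, 2, 5, 3, 4, 2], [2, 4, 3, 3, 2, 1],
   [4, 2, 1, 3, 1, 5], [2, 1, 2, 1, 2, 5]]

def cal_att_alt (team : List Int) : List Int :=
  if team.length = 0 then List.replicate 5 0
  else
    -- counts[t] = counts.get(t, 0) + 1
    let counts : PySem.Dict Int Int :=
      team.foldl (fun d t => d.insert t (d.getD t 0 + 1)) PySem.Dict.empty
    -- for col in columns: p = 1; for t, c in counts.items(): p *= col[t-1] ** c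
    colsB.map (fun col =>
      counts.items.foldl
        (fun p tc => p * ((PySem.List.pyGet? col (tc.1 - 1)).getD 0) ^ tc.2.toNat) 1)

-- ===== PRECONDITION & SPEC =====
-- Pre_ excludes exactly the teams holding a member outside -5..6, on which A's attribute_table[i-1] raises IndexError.
def Pre_cal_att (team : List Int) : Prop := ∀ t ∈ team, -5 ≤ t ∧ t ≤ 6
instance (team : List Int) : Decidable (Pre_cal_att team) := by unfold Pre_cal_att; infer_instance
def pvWitness_cal_att : List Int := [1, 2, 0, -5, 6, 2]

def Spec_cal_att (team : List Int) (out : List Int) : Prop := out = cal_att_alt team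
instance (team : List Int) (out : List Int) : Decidable (Spec_cal_att team out) := by unfold Spec_cal_att; infer_instance

-- ===== CLAIM (what is proved, stated in full; the proofs are below) =====
def Claim_equal_cal_att : Prop := ∀ (team : List Int), Dom_cal_att team → Pre_cal_att team → Spec_cal_att team (cal_att team)

-- ===== LEMMAS AND PROOFS =====

-- the one entry of a column a member selects (Python negative indexing via pyGet?)
def colEnt (col : List Int) (t : Int) : Int := (PySem.List.pyGet? col (t - 1)).getD 0

-- A's row for member t is exactly the five column entries
lemma rowA_eq_cols (t : Int) (h1 : -5 ≤ t) (h2 : t ≤ 6) :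
    (PySem.List.pyGet? calTableA (t - 1)).getD [] =
      [colEnt [4,5,3,4,5,1] t, colEnt [2,2,5,3,4,2] t, colEnt [2,4,3,3,2,1] t,
       colEnt [4,2,1,3,1,5] t, colEnt [2,1,2,1,2,5] t] := by
  interval_cases t <;> rfl

-- A's loop, componentwise: each slot accumulates a product of column entries
lemma foldA_components (team : List Int) (h : Pre_cal_att team) (a0 a1 a2 a3 a4 : Int) :
    team.foldl
      (fun att i => List.zipWith (· * ·) att ((PySem.List.pyGet? calTableA (i - 1)).getD []))
      [a0, a1, a2, a3, a4] =
    [a0 * (team.map (colEnt [4,5,3,4,5,1])).prod,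
     a1 * (team.map (colEnt [2,2,5,3,4,2])).prod,
     a2 * (team.map (colEnt [2,4,3,3,2,1])).prod,
     a3 * (team.map (colEnt [4,2,1,3,1,5])).prod,
     a4 * (team.map (colEnt [2,1,2,1,2,5])).prod] := by
  induction team generalizing a0 a1 a2 a3 a4 with
  | nil => simp
  | cons t ts ih =>
      have ht := h t (by simp)
      have hts : Pre_cal_att ts := fun x hx => h x (by simp [hx])
      simp only [List.foldl_cons, rowA_eq_cols t ht.1 ht.2, List.zipWith]
      rw [ih hts]
      simp only [List.map_cons, List.prod_cons]
      ring_nf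

-- fold of multiplication starting at a is a * product of the mapped list
lemma foldl_mul_eq_prod_map {α : Type} (f : α → Int) (l : List α) (a : Int) :
    l.foldl (fun p x => p * f x) a = a * (l.map f).prod := by
  induction l generalizing a with
  | nil => simp
  | cons x xs ih => simp [ih, mul_assoc]

-- count of x in the grouped flatMap of a nodup list
lemma count_flatMap_replicate (l : List Int) (d : List Int) (hd : d.Nodup) (x : Int) :
    ((d.flatMap (fun t => List.replicate (l.count t) t)).count x) =
      if x ∈ d then l.count x else 0 := by
  induction d with
  | nil => simp
  | cons t ds ih =>
      have hnd := (List.nodup_cons.mp hd).2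
      have hnt := (List.nodup_cons.mp hd).1
      simp only [List.flatMap_cons, List.count_append, List.count_replicate, ih hnd]
      by_cases hxt : x = t
      · subst hxt
        simp [hnt]
      · simp [hxt, Ne.symm hxt]

-- a list is a permutation of its dedup grouped by multiplicity
lemma perm_dedup_flatMap (l : List Int) :
    l.Perm ((PySem.List.dedup l).flatMap (fun t => List.replicate (l.count t) t)) := by
  rw [List.perm_iff_count]
  intro x
  rw [count_flatMap_replicate l _ (PySem.List.nodup_dedup l) x]
  by_cases hx : x ∈ l
  · simp [hx]
  · simp [hx, List.count_eq_zero_of_not_mem hx]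

-- product of a flatMap is the product of the inner products
lemma prod_flatMap {α : Type} (g : α → List Int) (d : List α) :
    (d.flatMap g).prod = (d.map (fun t => (g t).prod)).prod := by
  induction d with
  | nil => rfl
  | cons t ds ih => simp [List.flatMap_cons, List.prod_append, ih]

-- a product over the team is the product over distinct members with exponents
lemma prod_map_eq_dedup_pow (f : Int → Int) (team : List Int) :
    (team.map f).prod =
      ((PySem.List.dedup team).map (fun t => f t ^ team.count t)).prod := by
  have hp := (perm_dedup_flatMap team).map f
  rw [hp.prod_eq]
  rw [List.map_flatMap]
  have : (fun t => ((List.replicate (team.count t) t).map f)) =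
      (fun t => List.replicate (team.count t) (f t)) := by
    funext t; simp
  rw [this, prod_flatMap]
  simp [List.prod_replicate]

-- B's per-column fold over the counter equals the dedup-with-exponents product
lemma foldB_col (col : List Int) (team : List Int) :
    ((team.foldl (fun d t => d.insert t (d.getD t 0 + 1)) (PySem.Dict.empty : PySem.Dict Int Int)).items.foldl
        (fun p tc => p * ((PySem.List.pyGet? col (tc.1 - 1)).getD 0) ^ tc.2.toNat) 1) =
      ((PySem.List.dedup team).map (fun t => colEnt col t ^ team.count t)).prod := by
  rw [PySem.Dict.foldl_insert_getD_add_one_eq_counter, PySem.Dict.items_counter]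
  rw [show (PySem.Set.ofList team : List Int) = PySem.List.dedup team from
        (PySem.List.dedup_eq_ofList team).symm]
  rw [List.foldl_map, foldl_mul_eq_prod_map, one_mul]
  congr 1

-- ===== VERDICT (by name: the statement is the Claim_ definition above) =====
theorem cal_att_spec : Claim_equal_cal_att := by
  intro team _ hpre
  unfold Spec_cal_att cal_att cal_att_alt
  by_cases hemp : team.length = 0
  · simp [hemp]
  · rw [if_neg hemp, if_neg hemp]
    rw [show (List.replicate 5 (1:Int)) = [1,1,1,1,1] from rfl]
    rw [foldA_components team hpre]
    simp only [colsB, List.map_cons, List.map_nil]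
    rw [foldB_col, foldB_col, foldB_col, foldB_col, foldB_col]
    simp only [one_mul, List.cons.injEq, and_true]
    exact ⟨prod_map_eq_dedup_pow _ _, prod_map_eq_dedup_pow _ _, prod_map_eq_dedup_pow _ _,
           prod_map_eq_dedup_pow _ _, prod_map_eq_dedup_pow _ _⟩
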